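-- pv_equiv track=rewrite | github.com/paul17crib/envoy-cli | envoy/squasher.py | squash_lines
-- ===== SOURCE A (Python) =====
-- from typing import Dict, List, Literal, Tuple
--
-- SquashStrategy = Literal["last", "first"]
--
-- def find_duplicate_keys(lines: List[str]) -> Dict[str, List[int]]:
--     """Return a mapping of key -> list of line indices where it appears.
--
--     Only keys that appear more than once are included.
--     """
--     seen: Dict[str, List[int]] = {}
--     for idx, line in enumerate(lines):
--         stripped = line.strip()
--         if not stripped or stripped.startswith("#"):
--             continue
--         if "=" not in stripped:
--             continue
--         key = stripped.split("=", 1)[0].strip()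
--         seen.setdefault(key, []).append(idx)
--     return {k: v for k, v in seen.items() if len(v) > 1}
--
-- def squash_lines(
--     lines: List[str],
--     strategy: SquashStrategy = "last",
-- ) -> Tuple[List[str], Dict[str, int]]:
--     """Remove duplicate key lines, keeping either the first or last occurrence.
--
--     Returns:
--         (squashed_lines, removed_counts) where removed_counts maps each
--         squashed key to the number of lines that were dropped.
--     """
--     duplicates = find_duplicate_keys(lines)
--     if not duplicates:
--         return list(lines), {}
--
--     lines_to_drop: set[int] = set()
--     removed_counts: Dict[str, int] = {}
--
--     for key, indices in duplicates.items():
--         if strategy == "last":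
--             drop = indices[:-1]
--         else:
--             drop = indices[1:]
--         lines_to_drop.update(drop)
--         removed_counts[key] = len(drop)
--
--     squashed = [line for idx, line in enumerate(lines) if idx not in lines_to_drop]
--     return squashed, removed_counts
-- ===== SOURCE B (Python) =====
-- def squash_lines(lines, strategy="last"):
--     """Remove duplicate key lines, keeping either the first or last occurrence."""
--     def key_of(line):
--         s = line.strip()
--         if not s or s.startswith("#") or "=" not in s:
--             return None
--         return s.split("=", 1)[0].strip()
--
--     keys = [key_of(line) for line in lines]
--
--     def dropped(i, k):
--         if k is None:
--             return False
--         shadow = keys[i + 1:] if strategy == "last" else keys[:i]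
--         return k in shadow
--
--     squashed = [line for i, (line, k) in enumerate(zip(lines, keys))
--                 if not dropped(i, k)]
--     uniq = list(dict.fromkeys(k for k in keys if k is not None))
--     removed = {k: keys.count(k) - 1 for k in uniq if keys.count(k) > 1}
--     return squashed, removed
-- ===== Notes on version B (the rewrite author's own statement) =====
-- stated objective: simpler
-- what changed: Drops find_duplicate_keys, the index-list dict and the drop-set entirely: B decides each line positionally (a key line is dropped iff the same key occurs later for strategy 'last', earlier otherwise) and builds removed_counts as a counting comprehension over the deduplicated keys.
import Mathlib
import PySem

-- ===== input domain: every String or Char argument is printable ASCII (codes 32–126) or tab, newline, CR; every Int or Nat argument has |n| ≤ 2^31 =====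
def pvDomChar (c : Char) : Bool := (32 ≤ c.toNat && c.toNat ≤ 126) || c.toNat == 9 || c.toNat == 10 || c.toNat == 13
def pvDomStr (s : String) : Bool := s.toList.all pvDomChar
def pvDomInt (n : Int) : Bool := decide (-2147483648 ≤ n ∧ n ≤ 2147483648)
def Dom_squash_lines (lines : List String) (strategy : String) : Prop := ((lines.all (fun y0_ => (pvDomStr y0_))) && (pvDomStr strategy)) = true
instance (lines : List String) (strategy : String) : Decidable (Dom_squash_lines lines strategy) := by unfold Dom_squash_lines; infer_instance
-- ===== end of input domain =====

-- B: instead of A's duplicate-index map plus drop-set, each line is kept or dropped by a direct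
-- positional test (a key line is dropped iff the same key occurs later for strategy "last",
-- earlier otherwise) and removed_counts is a counting comprehension; objective: simpler, not faster.


-- ===== PORT A =====
def find_duplicate_keys (lines : List String) : PySem.Dict String (List Int) :=
  let seen := (PySem.List.enumerate lines).foldl (fun (seen : PySem.Dict String (List Int)) p =>
    let stripped := PySem.Str.strip p.2
    if stripped = "" || PySem.Str.startswith stripped "#" then seen
    else if PySem.Str.isIn "=" stripped = false then seen
    else
      let key := PySem.Str.strip (((PySem.Str.splitMax? stripped "=" 1).getD []).headD "")
      seen.modify key [] (· ++ [p.1])) PySem.Dict.empty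
  (seen.items.filter (fun kv => kv.2.length > 1)).foldl (fun d kv => d.insert kv.1 kv.2) PySem.Dict.empty

def squash_lines (lines : List String) (strategy : String) : List String × (List (String × Int)) :=
  let duplicates := find_duplicate_keys lines
  if duplicates.size = 0 then (lines, [])
  else
    let st := duplicates.items.foldl (fun (st : PySem.Set Int × PySem.Dict String Int) kv =>
        let drop := if strategy = "last" then PySem.List.slice kv.2 none (some (-1))
                    else PySem.List.slice kv.2 (some 1) none
        (PySem.Set.update st.1 drop, st.2.insert kv.1 (PySem.List.len drop)))
      (PySem.Set.empty, PySem.Dict.empty)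
    ((PySem.List.enumerate lines).filterMap (fun p =>
        if st.1.contains p.1 then none else some p.2), st.2.items)

-- ===== PORT B =====
def sq_key? (line : String) : Option String :=
  let s := PySem.Str.strip line
  if s = "" || PySem.Str.startswith s "#" || PySem.Str.isIn "=" s = false then none
  else some (PySem.Str.strip (((PySem.Str.splitMax? s "=" 1).getD []).headD ""))

def sq_dropped (keys : List (Option String)) (strategy : String) (i : Int) (k : Option String) : Bool :=
  match k with
  | none => false
  | some kk =>
    let shadow := if strategy = "last" then PySem.List.slice keys (some (i + 1)) none
                  else PySem.List.slice keys none (some i)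
    shadow.contains (some kk)

def squash_lines_alt (lines : List String) (strategy : String) : List String × (List (String × Int)) :=
  let keys := lines.map sq_key?
  let squashed := (PySem.List.enumerate (lines.zip keys)).filterMap (fun p =>
      if sq_dropped keys strategy p.1 p.2.2 then none else some p.2.1)
  let uniq := PySem.List.dedup (keys.filterMap id)
  let removed := uniq.foldl (fun (d : PySem.Dict String Int) k =>
      if 1 < PySem.List.count keys (some k) then d.insert k ((PySem.List.count keys (some k) : Int) - 1)
      else d) PySem.Dict.empty
  (squashed, removed.items)

-- ===== PRECONDITION & SPEC =====
def Spec_squash_lines (lines : List String) (strategy : String) (out : List String × (List (String × Int))) : Prop := out = squash_lines_alt lines strategy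
instance (lines : List String) (strategy : String) (out : List String × (List (String × Int))) : Decidable (Spec_squash_lines lines strategy out) := by unfold Spec_squash_lines; infer_instance

-- ===== CLAIM (what is proved, stated in full; the proofs are below) =====
def Claim_equal_squash_lines : Prop := ∀ (lines : List String) (strategy : String), Dom_squash_lines lines strategy → Spec_squash_lines lines strategy (squash_lines lines strategy)

-- ===== LEMMAS AND PROOFS =====

-- the parsed (key, index) pairs of the lines, indices counted from s
def sqPairs (l : List String) (s : Int) : List (String × Int) :=
  (PySem.List.enumerate l s).filterMap (fun p => (sq_key? p.2).map (fun k => (k, p.1)))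

-- the indices at which key k occurs
def sqIdxs (l : List String) (k : String) : List Int :=
  ((sqPairs l 0).filter (fun q => q.1 == k)).map (fun q => q.2)

-- the duplicated keys, in first-occurrence order
def sqDup (l : List String) : List String :=
  (PySem.Set.ofList ((l.map sq_key?).filterMap id)).filter (fun k => decide (1 < (sqIdxs l k).length))

-- the indices A drops for one duplicated key
def sqDrop (strategy : String) (v : List Int) : List Int :=
  if strategy = "last" then PySem.List.slice v none (some (-1)) else PySem.List.slice v (some 1) none

lemma sqPairs_cons (x : String) (t : List String) (s : Int) :
    sqPairs (x :: t) s = (match sq_key? x with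
      | none => sqPairs t (s + 1)
      | some k => (k, s) :: sqPairs t (s + 1)) := by
  simp only [sqPairs, PySem.List.enumerate_cons, List.filterMap_cons]
  cases sq_key? x <;> simp

lemma bodyA_eq (d : PySem.Dict String (List Int)) (i : Int) (x : String) :
    (let stripped := PySem.Str.strip x
     if stripped = "" || PySem.Str.startswith stripped "#" then d
     else if PySem.Str.isIn "=" stripped = false then d
     else d.modify (PySem.Str.strip (((PySem.Str.splitMax? stripped "=" 1).getD []).headD "")) [] (· ++ [i]))
    = (match sq_key? x with
       | none => d
       | some k => d.modify k [] (· ++ [i])) := by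
  simp only [sq_key?]
  by_cases h1 : PySem.Str.strip x = "" <;>
    by_cases h2 : PySem.Str.startswith (PySem.Str.strip x) "#" = true <;>
      by_cases h3 : PySem.Str.isIn "=" (PySem.Str.strip x) = false <;>
        simp_all

lemma seenA_eq (l : List String) (s : Int) (d : PySem.Dict String (List Int)) :
    (PySem.List.enumerate l s).foldl (fun (seen : PySem.Dict String (List Int)) p =>
      let stripped := PySem.Str.strip p.2
      if stripped = "" || PySem.Str.startswith stripped "#" then seen
      else if PySem.Str.isIn "=" stripped = false then seen
      else seen.modify (PySem.Str.strip (((PySem.Str.splitMax? stripped "=" 1).getD []).headD "")) [] (· ++ [p.1])) d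
    = (sqPairs l s).foldl (fun d q => d.modify q.1 [] (· ++ [q.2])) d := by
  induction l generalizing s d with
  | nil => simp [sqPairs]
  | cons x t ih =>
      rw [PySem.List.enumerate_cons, List.foldl_cons, sqPairs_cons]
      have := bodyA_eq d s x
      cases hk : sq_key? x with
      | none => simp only [hk] at this; rw [this, ih]
      | some k => simp only [hk] at this; rw [this, List.foldl_cons, ih]

lemma mem_sqPairs (l : List String) (s : Int) (q : String × Int) :
    q ∈ sqPairs l s ↔ ∃ j : Nat, ∃ h : j < l.length, sq_key? l[j] = some q.1 ∧ q.2 = s + j := by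
  induction l generalizing s with
  | nil => simp [sqPairs]
  | cons x t ih =>
      rw [sqPairs_cons]
      cases hk : sq_key? x with
      | none =>
          rw [ih]
          constructor
          · rintro ⟨j, hj, h1, h2⟩
            exact ⟨j + 1, by simpa using hj, by simpa using h1, by push_cast; omega⟩
          · rintro ⟨j, hj, h1, h2⟩
            cases j with
            | zero => simp at h1; rw [h1] at hk; simp at hk
            | succ j => exact ⟨j, by simpa using hj, by simpa using h1, by push_cast at h2 ⊢; omega⟩
      | some k =>
          simp only [List.mem_cons, ih]
          constructor
          · rintro (rfl | ⟨j, hj, h1, h2⟩)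
            · exact ⟨0, by simp, by simpa using hk, by simp⟩
            · exact ⟨j + 1, by simpa using hj, by simpa using h1, by push_cast; omega⟩
          · rintro ⟨j, hj, h1, h2⟩
            cases j with
            | zero =>
                left
                simp at h1 h2
                rw [h1] at hk
                cases q
                simp_all
            | succ j => exact Or.inr ⟨j, by simpa using hj, by simpa using h1, by push_cast at h2 ⊢; omega⟩

lemma pairwise_sqPairs (l : List String) (s : Int) :
    (sqPairs l s).Pairwise (fun a b => a.2 < b.2) := by
  induction l generalizing s with
  | nil => simp [sqPairs]
  | cons x t ih =>
      rw [sqPairs_cons]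
      cases hk : sq_key? x with
      | none => exact ih (s + 1)
      | some k =>
          refine List.Pairwise.cons ?_ (ih (s + 1))
          intro q hq
          rcases (mem_sqPairs t (s + 1) q).1 hq with ⟨j, hj, _, h2⟩
          simp only
          omega

lemma mem_sqIdxs (l : List String) (k : String) (x : Int) :
    x ∈ sqIdxs l k ↔ ∃ j : Nat, ∃ h : j < l.length, sq_key? l[j] = some k ∧ x = (j : Int) := by
  simp only [sqIdxs, List.mem_map, List.mem_filter]
  constructor
  · rintro ⟨q, ⟨hq, hk⟩, rfl⟩
    rcases (mem_sqPairs l 0 q).1 hq with ⟨j, hj, h1, h2⟩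
    refine ⟨j, hj, ?_, by omega⟩
    rwa [(beq_iff_eq).1 hk] at h1
  · rintro ⟨j, hj, h1, rfl⟩
    exact ⟨(k, (j : Int)), ⟨(mem_sqPairs l 0 _).2 ⟨j, hj, h1, by omega⟩, by simp⟩, rfl⟩

lemma pairwise_sqIdxs (l : List String) (k : String) :
    (sqIdxs l k).Pairwise (· < ·) :=
  ((pairwise_sqPairs l 0).filter _).map _ (fun _ _ h => h)

lemma length_filter_sqPairs (l : List String) (s : Int) (k : String) :
    ((sqPairs l s).filter (fun q => q.1 == k)).length = (l.map sq_key?).count (some k) := by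
  induction l generalizing s with
  | nil => simp [sqPairs]
  | cons x t ih =>
      rw [sqPairs_cons]
      cases hk : sq_key? x with
      | none => simp [List.count_cons, hk, ih]
      | some k' =>
          by_cases h : k' = k <;> simp [List.count_cons, hk, h, List.filter_cons, ih]

lemma length_sqIdxs (l : List String) (k : String) :
    (sqIdxs l k).length = (l.map sq_key?).count (some k) := by
  rw [sqIdxs, List.length_map]; exact length_filter_sqPairs l 0 k

lemma map_fst_sqPairs (l : List String) (s : Int) :
    (sqPairs l s).map (fun q => q.1) = (l.map sq_key?).filterMap id := by
  induction l generalizing s with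
  | nil => simp [sqPairs]
  | cons x t ih =>
      rw [sqPairs_cons]
      cases hk : sq_key? x with
      | none => simp [hk, ih]
      | some k' => simp [hk, ih]

-- membership in dropLast / tail of a strictly increasing list
lemma mem_dropLast_pairwise {l : List Int} (hp : l.Pairwise (· < ·)) (x : Int) :
    x ∈ l.dropLast ↔ x ∈ l ∧ ∃ y ∈ l, x < y := by
  induction l with
  | nil => simp
  | cons a t ih =>
      cases t with
      | nil => simp; omega
      | cons b u =>
          rw [List.dropLast_cons₂, List.mem_cons, ih (List.Pairwise.sublist (by simp) hp)]
          rcases List.pairwise_cons.1 hp with ⟨ha, hp'⟩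
          constructor
          · rintro (rfl | ⟨h1, y, hy, hxy⟩)
            · exact ⟨by simp, b, by simp, ha b (by simp)⟩
            · exact ⟨by simp [h1], y, by simp [hy], hxy⟩
          · rintro ⟨h1, y, hy, hxy⟩
            rcases List.mem_cons.1 h1 with rfl | h1'
            · exact Or.inl rfl
            · refine Or.inr ⟨h1', ?_⟩
              rcases List.mem_cons.1 hy with rfl | hy'
              · exact absurd (ha x h1') (by omega)
              · exact ⟨y, hy', hxy⟩

lemma mem_tail_pairwise {l : List Int} (hp : l.Pairwise (· < ·)) (x : Int) :
    x ∈ l.tail ↔ x ∈ l ∧ ∃ y ∈ l, y < x := by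
  cases l with
  | nil => simp
  | cons a t =>
      rcases List.pairwise_cons.1 hp with ⟨ha, _⟩
      simp only [List.tail_cons, List.mem_cons]
      constructor
      · intro h
        exact ⟨Or.inr h, a, Or.inl rfl, ha x h⟩
      · rintro ⟨h1, y, hy, hyx⟩
        rcases h1 with rfl | h1'
        · rcases hy with rfl | hy'
          · omega
          · exact absurd (ha y hy') (by omega)
        · exact h1'

lemma one_lt_length_of_two_mem {l : List Int} {x y : Int} (hx : x ∈ l) (hy : y ∈ l)
    (hxy : x < y) : 1 < l.length := by
  match l with
  | [] => simp at hx
  | [a] => simp at hx hy; omega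
  | a :: b :: t => simp

-- find_duplicate_keys characterized
lemma seen_items (lines : List String) :
    ((sqPairs lines 0).foldl (fun d q => d.modify q.1 [] (· ++ [q.2])) PySem.Dict.empty).items
      = (PySem.Set.ofList ((lines.map sq_key?).filterMap id)).map (fun k => (k, sqIdxs lines k)) := by
  set S := (sqPairs lines 0).foldl (fun d q => d.modify q.1 [] (· ++ [q.2])) PySem.Dict.empty with hS
  have hkeys : S.keys = PySem.Set.ofList ((lines.map sq_key?).filterMap id) := by
    rw [hS, PySem.Dict.keys_foldl_modify_key (sqPairs lines 0) (fun q => q.1) [] (fun _ q v => v ++ [q.2])]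
    simp [map_fst_sqPairs, PySem.Set.update_nil_left]
  have hnd : S.keys.Nodup := by rw [hkeys]; exact PySem.Set.nodup_ofList _
  have hget : ∀ k, S.getD k [] = sqIdxs lines k := by
    intro k
    rw [hS, PySem.Dict.getD_foldl_modify_append (sqPairs lines 0) PySem.Dict.empty k]
    simp [sqIdxs]
  rw [PySem.Dict.items_eq_map_keys S hnd [], hkeys]
  exact List.map_congr_left (fun k _ => by rw [hget k])

lemma fdk_items (lines : List String) :
    (find_duplicate_keys lines).items = (sqDup lines).map (fun k => (k, sqIdxs lines k)) := by
  unfold find_duplicate_keys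
  simp only [seenA_eq, seen_items]
  rw [List.filter_map]
  have hfil : ((PySem.Set.ofList ((lines.map sq_key?).filterMap id)).filter
      ((fun kv => decide (kv.2.length > 1)) ∘ (fun k => (k, sqIdxs lines k)))) = sqDup lines := by
    simp [sqDup, Function.comp]
    rfl
  rw [hfil]
  have hnd2 : (((sqDup lines).map (fun k => (k, sqIdxs lines k))).map (fun kv => kv.1)).Nodup := by
    simp only [List.map_map]
    have : ((fun kv : String × List Int => kv.1) ∘ fun k => (k, sqIdxs lines k)) = id := rfl
    rw [this, List.map_id]
    exact (PySem.Set.nodup_ofList _).filter _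
  have hmain := PySem.Dict.items_foldl_insert_fresh ((sqDup lines).map (fun k => (k, sqIdxs lines k)))
      (fun kv => kv.1) (fun kv => kv.2) PySem.Dict.empty (by intro a _; simp) hnd2
  simpa using hmain

lemma mem_foldl_update {β : Type} (f : β → List Int) (l : List β) (s0 : PySem.Set Int) (x : Int) :
    x ∈ l.foldl (fun s e => PySem.Set.update s (f e)) s0 ↔ x ∈ s0 ∨ ∃ e ∈ l, x ∈ f e := by
  induction l generalizing s0 with
  | nil => simp
  | cons a t ih =>
      rw [List.foldl_cons, ih]
      simp only [PySem.Set.mem_update, List.mem_cons]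
      constructor
      · rintro ((h | h) | ⟨e, he, hx⟩)
        · exact Or.inl h
        · exact Or.inr ⟨a, Or.inl rfl, h⟩
        · exact Or.inr ⟨e, Or.inr he, hx⟩
      · rintro (h | ⟨e, (rfl | he), hx⟩)
        · exact Or.inl (Or.inl h)
        · exact Or.inl (Or.inr hx)
        · exact Or.inr ⟨e, he, hx⟩

lemma shadow_last (keys : List (Option String)) (j : Nat) (kk : String) :
    (PySem.List.slice keys (some ((j : Int) + 1)) none).contains (some kk) = true ↔
      ∃ j' : Nat, j < j' ∧ ∃ h : j' < keys.length, keys[j'] = some kk := by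
  have h1 : ((j : Int) + 1) = ((j + 1 : Nat) : Int) := by push_cast; ring
  rw [h1, PySem.List.slice_from_natCast, List.contains_iff_mem, List.mem_drop_iff_getElem]
  constructor
  · rintro ⟨m, hm, h⟩
    exact ⟨j + 1 + m, by omega, by omega, by simpa using h⟩
  · rintro ⟨j', hjj', hlen, h⟩
    refine ⟨j' - (j + 1), by omega, ?_⟩
    have he : j + 1 + (j' - (j + 1)) = j' := by omega
    simp only [he]
    exact h

lemma shadow_first (keys : List (Option String)) (j : Nat) (kk : String) :
    (PySem.List.slice keys none (some (j : Int))).contains (some kk) = true ↔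
      ∃ j' : Nat, j' < j ∧ ∃ h : j' < keys.length, keys[j'] = some kk := by
  rw [PySem.List.slice_to_natCast, List.contains_iff_mem, List.mem_take_iff_getElem]
  constructor
  · rintro ⟨m, hm, h⟩
    exact ⟨m, by omega, by omega, h⟩
  · rintro ⟨j', hjj', hlen, h⟩
    exact ⟨j', by omega, h⟩

lemma mem_sqDup (lines : List String) (k : String) :
    k ∈ sqDup lines ↔ (∃ j : Nat, ∃ h : j < lines.length, sq_key? lines[j] = some k)
      ∧ 1 < (sqIdxs lines k).length := by
  simp only [sqDup, List.mem_filter, PySem.Set.mem_ofList, decide_eq_true_eq]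
  constructor
  · rintro ⟨hmem, hlen⟩
    rcases List.mem_filterMap.1 hmem with ⟨a, ha, hid⟩
    rcases List.mem_map.1 ha with ⟨line, hline, rfl⟩
    rcases List.mem_iff_getElem.1 hline with ⟨j, hj, rfl⟩
    exact ⟨⟨j, hj, by simpa using hid⟩, hlen⟩
  · rintro ⟨⟨j, hj, hkey⟩, hlen⟩
    refine ⟨List.mem_filterMap.2 ⟨some k, List.mem_map.2 ⟨lines[j], List.getElem_mem hj, hkey⟩, rfl⟩, hlen⟩

lemma drop_iff (lines : List String) (strategy : String) (j : Nat) (hj : j < lines.length) :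
    sq_dropped (lines.map sq_key?) strategy (j : Int) (sq_key? lines[j]) = true
      ↔ ∃ k ∈ sqDup lines, (j : Int) ∈ sqDrop strategy (sqIdxs lines k) := by
  cases hk : sq_key? lines[j] with
  | none =>
      simp only [sq_dropped, Bool.false_eq_true, false_iff]
      rintro ⟨k, _, hmem⟩
      have hmem' : (j : Int) ∈ sqIdxs lines k := by
        unfold sqDrop at hmem
        split_ifs at hmem <;> exact PySem.List.mem_of_mem_slice _ _ _ hmem
      rcases (mem_sqIdxs lines k _).1 hmem' with ⟨j', hj', hkey, hjeq⟩
      have he : j' = j := by omega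
      subst he
      rw [hk] at hkey
      simp at hkey
  | some kk =>
      simp only [sq_dropped]
      by_cases hs : strategy = "last"
      · rw [if_pos hs]
        rw [shadow_last]
        constructor
        · rintro ⟨j', hjj', hlen, hkey'⟩
          have hlen' : j' < lines.length := by simpa using hlen
          have hkey'' : sq_key? lines[j'] = some kk := by
            have := hkey'
            rw [List.getElem_map] at this
            exact this
          have hjmem : (j : Int) ∈ sqIdxs lines kk := (mem_sqIdxs lines kk _).2 ⟨j, hj, hk, rfl⟩
          have hj'mem : (j' : Int) ∈ sqIdxs lines kk := (mem_sqIdxs lines kk _).2 ⟨j', hlen', hkey'', rfl⟩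
          have hlt : (j : Int) < (j' : Int) := by exact_mod_cast hjj'
          refine ⟨kk, (mem_sqDup lines kk).2 ⟨⟨j, hj, hk⟩,
            one_lt_length_of_two_mem hjmem hj'mem hlt⟩, ?_⟩
          rw [sqDrop, if_pos hs, PySem.List.slice_to_neg_one]
          exact (mem_dropLast_pairwise (pairwise_sqIdxs lines kk) _).2 ⟨hjmem, (j' : Int), hj'mem, hlt⟩
        · rintro ⟨k, hkdup, hmem⟩
          rw [sqDrop, if_pos hs, PySem.List.slice_to_neg_one] at hmem
          rcases (mem_dropLast_pairwise (pairwise_sqIdxs lines k) _).1 hmem with ⟨hjmem, y, hy, hlt⟩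
          have hkkk : k = kk := by
            rcases (mem_sqIdxs lines k _).1 hjmem with ⟨j'', hj'', hkey'', hjeq⟩
            have he : j'' = j := by omega
            subst he
            rw [hk] at hkey''
            exact (Option.some_inj.1 hkey'').symm
          subst hkkk
          rcases (mem_sqIdxs lines k _).1 hy with ⟨jy, hjy, hykey, rfl⟩
          refine ⟨jy, by exact_mod_cast hlt, by simpa using hjy, ?_⟩
          rw [List.getElem_map]
          exact hykey
      · rw [if_neg hs]
        rw [shadow_first]
        constructor
        · rintro ⟨j', hjj', hlen, hkey'⟩
          have hlen' : j' < lines.length := by simpa using hlen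
          have hkey'' : sq_key? lines[j'] = some kk := by
            have := hkey'
            rw [List.getElem_map] at this
            exact this
          have hjmem : (j : Int) ∈ sqIdxs lines kk := (mem_sqIdxs lines kk _).2 ⟨j, hj, hk, rfl⟩
          have hj'mem : (j' : Int) ∈ sqIdxs lines kk := (mem_sqIdxs lines kk _).2 ⟨j', hlen', hkey'', rfl⟩
          have hlt : (j' : Int) < (j : Int) := by exact_mod_cast hjj'
          refine ⟨kk, (mem_sqDup lines kk).2 ⟨⟨j, hj, hk⟩,
            one_lt_length_of_two_mem hj'mem hjmem hlt⟩, ?_⟩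
          rw [sqDrop, if_neg hs, PySem.List.slice_from_one]
          exact (mem_tail_pairwise (pairwise_sqIdxs lines kk) _).2 ⟨hjmem, (j' : Int), hj'mem, hlt⟩
        · rintro ⟨k, hkdup, hmem⟩
          rw [sqDrop, if_neg hs, PySem.List.slice_from_one] at hmem
          rcases (mem_tail_pairwise (pairwise_sqIdxs lines k) _).1 hmem with ⟨hjmem, y, hy, hlt⟩
          have hkkk : k = kk := by
            rcases (mem_sqIdxs lines k _).1 hjmem with ⟨j'', hj'', hkey'', hjeq⟩
            have he : j'' = j := by omega
            subst he
            rw [hk] at hkey''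
            exact (Option.some_inj.1 hkey'').symm
          subst hkkk
          rcases (mem_sqIdxs lines k _).1 hy with ⟨jy, hjy, hykey, rfl⟩
          refine ⟨jy, by exact_mod_cast hlt, by simpa using hjy, ?_⟩
          rw [List.getElem_map]
          exact hykey

lemma filterMap_enumerate_congr {α β : Type} (l : List α) (s : Int) (f g : Int × α → Option β)
    (h : ∀ (j : Nat) (hj : j < l.length), f (s + j, l[j]) = g (s + j, l[j])) :
    (PySem.List.enumerate l s).filterMap f = (PySem.List.enumerate l s).filterMap g := by
  induction l generalizing s with
  | nil => simp [PySem.List.enumerate]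
  | cons x t ih =>
      rw [PySem.List.enumerate_cons, List.filterMap_cons, List.filterMap_cons]
      have h0 := h 0 (by simp)
      simp only [Nat.cast_zero, add_zero, List.getElem_cons_zero] at h0
      rw [h0]
      have ht : (PySem.List.enumerate t (s + 1)).filterMap f = (PySem.List.enumerate t (s + 1)).filterMap g := by
        apply ih
        intro j hj
        have := h (j + 1) (by simpa using hj)
        have he : s + ((j + 1 : Nat) : Int) = s + 1 + (j : Int) := by push_cast; ring
        rw [he] at this
        simpa using this
      rw [ht]

lemma enumerate_zip_map {α β : Type} (l : List α) (f : α → β) (s : Int) :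
    PySem.List.enumerate (l.zip (l.map f)) s = (PySem.List.enumerate l s).map (fun p => (p.1, (p.2, f p.2))) := by
  induction l generalizing s with
  | nil => simp [PySem.List.enumerate]
  | cons x t ih =>
      rw [List.map_cons, List.zip_cons_cons, PySem.List.enumerate_cons, PySem.List.enumerate_cons,
        List.map_cons, ih]

lemma len_drop_if (strategy : String) (v : List Int) (hv : 1 ≤ v.length) :
    PySem.List.len (if strategy = "last" then PySem.List.slice v none (some (-1))
      else PySem.List.slice v (some 1) none) = (v.length : Int) - 1 := by
  split_ifs
  · rw [PySem.List.slice_to_neg_one, PySem.List.len_eq, List.length_dropLast]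
    push_cast [Nat.cast_sub hv]
    ring
  · rw [PySem.List.slice_from_one, PySem.List.len_eq, List.length_tail]
    push_cast [Nat.cast_sub hv]
    ring

lemma fold1_contains_iff (lines : List String) (strategy : String) (x : Int) :
    (((sqDup lines).map (fun k => (k, sqIdxs lines k))).foldl (fun st kv =>
        PySem.Set.update st (if strategy = "last" then PySem.List.slice kv.2 none (some (-1))
          else PySem.List.slice kv.2 (some 1) none)) PySem.Set.empty).contains x = true
      ↔ ∃ k ∈ sqDup lines, x ∈ sqDrop strategy (sqIdxs lines k) := by
  rw [PySem.Set.contains_iff, mem_foldl_update]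
  constructor
  · rintro (h | ⟨e, he, hx⟩)
    · simp [PySem.Set.empty] at h
    · rcases List.mem_map.1 he with ⟨k, hk, rfl⟩
      exact ⟨k, hk, hx⟩
  · rintro ⟨k, hk, hx⟩
    exact Or.inr ⟨(k, sqIdxs lines k), List.mem_map.2 ⟨k, hk, rfl⟩, hx⟩

-- the common canonical value of both programs
def sqCanon (lines : List String) (strategy : String) : List String × (List (String × Int)) :=
  ((PySem.List.enumerate lines).filterMap (fun p =>
      if sq_dropped (lines.map sq_key?) strategy p.1 (sq_key? p.2) then none else some p.2),
   (sqDup lines).map (fun k => (k, ((lines.map sq_key?).count (some k) : Int) - 1)))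

lemma squash_lines_eq (lines : List String) (strategy : String) :
    squash_lines lines strategy =
      if (find_duplicate_keys lines).size = 0 then (lines, []) else
      ((PySem.List.enumerate lines).filterMap (fun p =>
          if (((find_duplicate_keys lines).items.foldl (fun st kv =>
                (PySem.Set.update st.1 (if strategy = "last" then PySem.List.slice kv.2 none (some (-1))
                    else PySem.List.slice kv.2 (some 1) none),
                 st.2.insert kv.1 (PySem.List.len (if strategy = "last" then PySem.List.slice kv.2 none (some (-1))
                    else PySem.List.slice kv.2 (some 1) none))))
              (PySem.Set.empty, PySem.Dict.empty)).1.contains p.1) then none else some p.2),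
       ((find_duplicate_keys lines).items.foldl (fun st kv =>
            (PySem.Set.update st.1 (if strategy = "last" then PySem.List.slice kv.2 none (some (-1))
                else PySem.List.slice kv.2 (some 1) none),
             st.2.insert kv.1 (PySem.List.len (if strategy = "last" then PySem.List.slice kv.2 none (some (-1))
                else PySem.List.slice kv.2 (some 1) none))))
          (PySem.Set.empty, PySem.Dict.empty)).2.items) := rfl

lemma A_char (lines : List String) (strategy : String) :
    squash_lines lines strategy = sqCanon lines strategy := by
  rw [squash_lines_eq, fdk_items]
  rw [PySem.List.foldl_prod_mk
    (f := fun (st : PySem.Set Int) (kv : String × List Int) =>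
      PySem.Set.update st (if strategy = "last" then PySem.List.slice kv.2 none (some (-1))
        else PySem.List.slice kv.2 (some 1) none))
    (g := fun (st : PySem.Dict String Int) (kv : String × List Int) =>
      PySem.Dict.insert st kv.1 (PySem.List.len (if strategy = "last" then PySem.List.slice kv.2 none (some (-1))
        else PySem.List.slice kv.2 (some 1) none)))]
  by_cases hsz : (find_duplicate_keys lines).size = 0
  · rw [if_pos hsz]
    have hdup : sqDup lines = [] := by
      have h0 : (find_duplicate_keys lines).items.length = 0 := hsz
      rw [fdk_items lines] at h0
      simpa using h0
    unfold sqCanon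
    refine Prod.ext ?_ (by simp [hdup])
    have hcongr := filterMap_enumerate_congr lines 0
      (fun p => if sq_dropped (lines.map sq_key?) strategy p.1 (sq_key? p.2) then none else some p.2)
      (fun p => some p.2)
      (by
        intro j hj
        simp only [zero_add]
        refine if_neg ?_
        intro hd
        rcases (drop_iff lines strategy j hj).1 hd with ⟨k, hk, _⟩
        rw [hdup] at hk
        simp at hk)
    show lines = _
    rw [hcongr]
    show lines = (PySem.List.enumerate lines).filterMap (fun p => some p.2)
    rw [show (fun p : Int × String => some p.2) = some ∘ (fun p : Int × String => p.2) from rfl,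
      List.filterMap_eq_map, PySem.List.map_snd_enumerate]
  · rw [if_neg hsz]
    unfold sqCanon
    refine Prod.ext ?_ ?_
    · show List.filterMap _ _ = _
      apply filterMap_enumerate_congr
      intro j hj
      simp only [zero_add]
      by_cases hd : sq_dropped (lines.map sq_key?) strategy (j : Int) (sq_key? lines[j]) = true
      · rw [if_pos hd, if_pos]
        exact (fold1_contains_iff lines strategy (j : Int)).2 ((drop_iff lines strategy j hj).1 hd)
      · rw [if_neg hd, if_neg]
        intro hc
        exact hd ((drop_iff lines strategy j hj).2 ((fold1_contains_iff lines strategy (j : Int)).1 hc))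
    · show (List.foldl _ PySem.Dict.empty _).items = _
      have hnd2 : (((sqDup lines).map (fun k => (k, sqIdxs lines k))).map (fun kv => kv.1)).Nodup := by
        simp only [List.map_map]
        have : ((fun kv : String × List Int => kv.1) ∘ fun k => (k, sqIdxs lines k)) = id := rfl
        rw [this, List.map_id]
        exact (PySem.Set.nodup_ofList _).filter _
      have hmain := PySem.Dict.items_foldl_insert_fresh ((sqDup lines).map (fun k => (k, sqIdxs lines k)))
        (fun kv => kv.1)
        (fun kv => PySem.List.len (if strategy = "last" then PySem.List.slice kv.2 none (some (-1))
            else PySem.List.slice kv.2 (some 1) none))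
        PySem.Dict.empty (by intro a _; simp) hnd2
      rw [hmain]
      have hie : (PySem.Dict.empty : PySem.Dict String Int).items = [] := rfl
      rw [hie]
      simp only [List.nil_append, List.map_map]
      apply List.map_congr_left
      intro k hk
      simp only [Function.comp]
      congr 1
      have hlen : 1 ≤ (sqIdxs lines k).length := by
        have := ((mem_sqDup lines k).1 hk).2
        omega
      rw [len_drop_if strategy _ hlen, length_sqIdxs]

lemma squash_lines_alt_eq (lines : List String) (strategy : String) :
    squash_lines_alt lines strategy =
      ((PySem.List.enumerate (lines.zip (lines.map sq_key?))).filterMap (fun p =>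
          if sq_dropped (lines.map sq_key?) strategy p.1 p.2.2 then none else some p.2.1),
       ((PySem.List.dedup ((lines.map sq_key?).filterMap id)).foldl (fun (d : PySem.Dict String Int) k =>
          if 1 < PySem.List.count (lines.map sq_key?) (some k) then
            d.insert k ((PySem.List.count (lines.map sq_key?) (some k) : Int) - 1)
          else d) PySem.Dict.empty).items) := rfl

lemma B_char (lines : List String) (strategy : String) :
    squash_lines_alt lines strategy = sqCanon lines strategy := by
  rw [squash_lines_alt_eq]
  unfold sqCanon
  refine Prod.ext ?_ ?_
  · show List.filterMap _ _ = _
    rw [enumerate_zip_map lines sq_key? 0, List.filterMap_map]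
    rfl
  · show PySem.Dict.items (List.foldl _ _ _) = _
    rw [PySem.List.dedup_eq_ofList]
    rw [PySem.List.foldl_ite_eq_foldl_filter
        (p := fun k => 1 < PySem.List.count (lines.map sq_key?) (some k))
        (f := fun (d : PySem.Dict String Int) k =>
          d.insert k ((PySem.List.count (lines.map sq_key?) (some k) : Int) - 1))]
    have hfil : (PySem.Set.ofList ((lines.map sq_key?).filterMap id)).filter
        (fun k => decide (1 < PySem.List.count (lines.map sq_key?) (some k))) = sqDup lines := by
      unfold sqDup
      apply List.filter_congr
      intro k _
      simp [length_sqIdxs, PySem.List.count]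
    rw [hfil]
    have hnd : ((sqDup lines).map (fun k => k)).Nodup := by
      simpa using (PySem.Set.nodup_ofList _).filter _
    have hmain := PySem.Dict.items_foldl_insert_fresh (sqDup lines) (fun k => k)
      (fun k => ((PySem.List.count (lines.map sq_key?) (some k) : Int) - 1)) PySem.Dict.empty
      (by intro a _; simp) hnd
    simpa [PySem.List.count] using hmain

-- ===== VERDICT (by name: the statement is the Claim_ definition above) =====
theorem squash_lines_spec : Claim_equal_squash_lines := by
  intro lines strategy _
  unfold Spec_squash_lines
  rw [A_char, B_char]
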